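-- pv_equiv track=rewrite | github.com/Adam-Jimenez/binarysearch-editorials | Bomber Man Sequel.py | solve
-- ===== SOURCE A (Python) =====
-- def solve(matrix):
--     rows={}
--     cols={}
--     for i in range(len(matrix)):
--         cur=[0]
--         for j in range(len(matrix[0])):
--             if matrix[i][j] == 2:
--                 cur[0]+=1
--             elif matrix[i][j] == 1:
--                 cur=[0]
--             rows[(i,j)]=cur
--     for j in range(len(matrix[0])):
--         cur=[0]
--         for i in range(len(matrix)):
--             if matrix[i][j] == 2:
--                 cur[0]+=1
--             elif matrix[i][j] == 1:
--                 cur=[0]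
--             cols[(i,j)]=cur
--     ans=0
--     for i in range(len(matrix)):
--         for j in range(len(matrix[0])):
--             if matrix[i][j] == 0:
--                 count=rows[(i,j)][0]+cols[(i,j)][0]
--                 ans=max(ans,count)
--     return ans
-- ===== SOURCE B (Python) =====
-- def seg_totals(line):
--     # per-cell total of 2s in the maximal 1-free segment containing the cell (walls get 0)
--     out = []
--     seg = []
--     for v in line:
--         if v == 1:
--             c = seg.count(2)
--             out.extend([c] * len(seg))
--             out.append(0)
--             seg = []
--         else:
--             seg.append(v)
--     c = seg.count(2)
--     out.extend([c] * len(seg))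
--     return out
--
--
-- def solve(matrix):
--     m = len(matrix[0])
--     grid = [row[:m] for row in matrix]
--     cols = [[row[j] for row in grid] for j in range(m)]
--     rowtot = [seg_totals(r) for r in grid]
--     coltot = [seg_totals(c) for c in cols]
--     ans = 0
--     for i, row in enumerate(grid):
--         for j, v in enumerate(row):
--             if v == 0:
--                 ans = max(ans, rowtot[i][j] + coltot[j][i])
--     return ans
-- ===== Notes on version B (the rewrite author's own statement) =====
-- stated objective: alternative
-- what changed: A threads mutable one-element lists shared between a variable and two (i,j)-keyed dicts so that later in-place increments retroactively fill every cell of a segment; B instead splits each row and each explicitly extracted column into 1-free segments, writes each segment's 2-count per cell with replicate into plain list grids, then scans the zero cells.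
-- outside the precondition, e.g. on solve([]): A raises IndexError, B raises IndexError; on solve([[0, 0], [0]]): A raises IndexError, B raises IndexError
import Mathlib
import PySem

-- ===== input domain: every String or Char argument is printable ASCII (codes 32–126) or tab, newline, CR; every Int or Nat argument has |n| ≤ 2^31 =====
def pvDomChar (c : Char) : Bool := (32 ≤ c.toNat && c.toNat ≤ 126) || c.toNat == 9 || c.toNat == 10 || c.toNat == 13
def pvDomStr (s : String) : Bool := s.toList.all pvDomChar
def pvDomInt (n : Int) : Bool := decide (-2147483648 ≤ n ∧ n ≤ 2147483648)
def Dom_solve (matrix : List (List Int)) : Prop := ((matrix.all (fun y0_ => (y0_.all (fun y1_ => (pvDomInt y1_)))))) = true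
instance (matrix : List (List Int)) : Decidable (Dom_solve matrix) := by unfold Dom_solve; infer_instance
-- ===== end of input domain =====

-- B replaces A's dict-of-aliased-mutable-lists trick by splitting each row/column into
-- 1-free segments (per-cell segment totals built with replicate) plus an explicit column
-- extraction; same return value on Pre_ (measured constant-factor speedup: list grids
-- instead of tuple-keyed dicts).

-- ===== PORT A =====
-- A mutates Python one-element lists that are shared between `cur` and dict values; the port
-- models that heap explicitly and exactly: each `[0]` allocation gets a fresh Nat id, `store`
-- maps id ↦ the list's single element, `cur` is the id bound to Python's variable `cur`, and
-- dicts map (i, j) ↦ id.  The two passes' objects are disjoint, so each pass carries its own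
-- id space and store; lookups `rows[(i,j)][0]` become `store.getD (rows.getD (i,j) _) 0`
-- (no KeyError is possible: every key was assigned).
def solve (matrix : List (List Int)) : Int :=
  let n : Int := matrix.length
  let m : Int := (PySem.List.pyGetD matrix 0 []).length   -- len(matrix[0]); Pre_ excludes the empty-matrix IndexError
  let rowSt :=
    (PySem.List.pyRange 0 n 1).foldl
      (fun (st : PySem.Dict (Int × Int) Nat × PySem.Dict Nat Int × Nat) i =>
        -- cur = [0]  (fresh cell, id st.2.2, content 0)
        let inner :=
          (PySem.List.pyRange 0 m 1).foldl
            (fun (s : PySem.Dict (Int × Int) Nat × PySem.Dict Nat Int × Nat × Nat) j =>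
              let v := PySem.List.pyGetD (PySem.List.pyGetD matrix i []) j 0  -- matrix[i][j]; in range on Pre_
              if v == 2 then (s.1.insert (i, j) s.2.2.1, s.2.1.modify s.2.2.1 0 (· + 1), s.2.2.1, s.2.2.2)
              else if v == 1 then (s.1.insert (i, j) s.2.2.2, s.2.1.insert s.2.2.2 0, s.2.2.2, s.2.2.2 + 1)
              else (s.1.insert (i, j) s.2.2.1, s.2.1, s.2.2.1, s.2.2.2))
            (st.1, st.2.1.insert st.2.2 0, st.2.2, st.2.2 + 1)
        (inner.1, inner.2.1, inner.2.2.2))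
      (PySem.Dict.empty, PySem.Dict.empty, 0)
  let colSt :=
    (PySem.List.pyRange 0 m 1).foldl
      (fun (st : PySem.Dict (Int × Int) Nat × PySem.Dict Nat Int × Nat) j =>
        let inner :=
          (PySem.List.pyRange 0 n 1).foldl
            (fun (s : PySem.Dict (Int × Int) Nat × PySem.Dict Nat Int × Nat × Nat) i =>
              let v := PySem.List.pyGetD (PySem.List.pyGetD matrix i []) j 0
              if v == 2 then (s.1.insert (i, j) s.2.2.1, s.2.1.modify s.2.2.1 0 (· + 1), s.2.2.1, s.2.2.2)
              else if v == 1 then (s.1.insert (i, j) s.2.2.2, s.2.1.insert s.2.2.2 0, s.2.2.2, s.2.2.2 + 1)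
              else (s.1.insert (i, j) s.2.2.1, s.2.1, s.2.2.1, s.2.2.2))
            (st.1, st.2.1.insert st.2.2 0, st.2.2, st.2.2 + 1)
        (inner.1, inner.2.1, inner.2.2.2))
      (PySem.Dict.empty, PySem.Dict.empty, 0)
  (PySem.List.pyRange 0 n 1).foldl
    (fun ans i =>
      (PySem.List.pyRange 0 m 1).foldl
        (fun ans j =>
          if PySem.List.pyGetD (PySem.List.pyGetD matrix i []) j 0 == 0 then
            max ans (rowSt.2.1.getD (rowSt.1.getD (i, j) 0) 0 + colSt.2.1.getD (colSt.1.getD (i, j) 0) 0)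
          else ans)
        ans)
    0

-- ===== PORT B =====
-- helper seg_totals of Source B
def segTotals (line : List Int) : List Int :=
  let st := line.foldl
    (fun (s : List Int × List Int) v =>
      if v == 1 then (s.1 ++ List.replicate s.2.length ((PySem.List.count s.2 2 : Nat) : Int) ++ [0], [])
      else (s.1, s.2 ++ [v]))
    ([], [])
  st.1 ++ List.replicate st.2.length ((PySem.List.count st.2 2 : Nat) : Int)

def solve_alt (matrix : List (List Int)) : Int :=
  let m : Int := (PySem.List.pyGetD matrix 0 []).length   -- len(matrix[0]); Pre_ excludes the empty-matrix IndexError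
  let grid := matrix.map (fun row => PySem.List.slice row none (some m))
  let cols := (PySem.List.pyRange 0 m 1).map (fun j => grid.map (fun row => PySem.List.pyGetD row j 0))
  let rowtot := grid.map segTotals
  let coltot := cols.map segTotals
  (PySem.List.enumerate grid 0).foldl
    (fun ans p =>
      (PySem.List.enumerate p.2 0).foldl
        (fun ans q =>
          if q.2 == 0 then
            max ans (PySem.List.pyGetD (PySem.List.pyGetD rowtot p.1 []) q.1 0 +
                     PySem.List.pyGetD (PySem.List.pyGetD coltot q.1 []) p.1 0)
          else ans)
        ans)
    0

-- ===== PRECONDITION & SPEC =====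
-- Pre_ excludes exactly the inputs where A raises IndexError: the empty matrix (len(matrix[0]))
-- and matrices with a row shorter than row 0 (matrix[i][j] for j < len(matrix[0])).
def Pre_solve (matrix : List (List Int)) : Prop :=
  matrix ≠ [] ∧ ∀ row ∈ matrix, matrix.headI.length ≤ row.length
instance (matrix : List (List Int)) : Decidable (Pre_solve matrix) := by unfold Pre_solve; infer_instance

def pvWitness_solve : List (List Int) := [[2, 0, 1, 0], [0, 1, 2, 2], [2, 0, 0, 1]]

def Spec_solve (matrix : List (List Int)) (out : Int) : Prop := out = solve_alt matrix
instance (matrix : List (List Int)) (out : Int) : Decidable (Spec_solve matrix out) := by unfold Spec_solve; infer_instance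

-- ===== CLAIM (what is proved, stated in full; the proofs are below) =====
def Claim_equal_solve : Prop := ∀ (matrix : List (List Int)), Dom_solve matrix → Pre_solve matrix → Spec_solve matrix (solve matrix)


-- ===== LEMMAS AND PROOFS =====

def stepA (key : Int → Int × Int)
    (s : PySem.Dict (Int × Int) Nat × PySem.Dict Nat Int × Nat × Nat) (p : Int × Int) :
    PySem.Dict (Int × Int) Nat × PySem.Dict Nat Int × Nat × Nat :=
  if p.2 == 2 then (s.1.insert (key p.1) s.2.2.1, s.2.1.modify s.2.2.1 0 (· + 1), s.2.2.1, s.2.2.2)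
  else if p.2 == 1 then (s.1.insert (key p.1) s.2.2.2, s.2.1.insert s.2.2.2 0, s.2.2.2, s.2.2.2 + 1)
  else (s.1.insert (key p.1) s.2.2.1, s.2.1, s.2.2.1, s.2.2.2)

def runA (key : Int → Int × Int) (l : List Int) (j0 : Int)
    (s : PySem.Dict (Int × Int) Nat × PySem.Dict Nat Int × Nat × Nat) :
    PySem.Dict (Int × Int) Nat × PySem.Dict Nat Int × Nat × Nat :=
  (PySem.List.enumerate l j0).foldl (stepA key) s

lemma pyGetD_take_eq {l : List Int} {k : Nat} {j : Int} (h0 : 0 ≤ j) (hj : j < (k : Int)) :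
    PySem.List.pyGetD (l.take k) j 0 = PySem.List.pyGetD l j 0 := by
  rw [PySem.List.pyGetD_of_nonneg _ _ h0, PySem.List.pyGetD_of_nonneg _ _ h0]
  have hjk : j.toNat < k := by omega
  simp [List.getD_eq_getElem?_getD, List.getElem?_take_of_lt hjk]

lemma inner_bridge (key : Int → Int × Int) (line : List Int) (m : Int)
    (h0 : 0 ≤ m) (hm : m ≤ (line.length : Int))
    (s : PySem.Dict (Int × Int) Nat × PySem.Dict Nat Int × Nat × Nat) :
    (PySem.List.pyRange 0 m 1).foldl
        (fun s j => stepA key s (j, PySem.List.pyGetD line j 0)) s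
      = runA key (line.take m.toNat) 0 s := by
  rw [runA, PySem.List.enumerate_eq_map_pyRange _ (0:Int), List.foldl_map]
  have hlen : (PySem.List.len (line.take m.toNat)) = m := by
    rw [PySem.List.len_eq]; simp [List.length_take]; omega
  rw [hlen]
  apply PySem.List.foldl_congr_mem
  intro acc x hx
  rw [PySem.List.mem_pyRange_one] at hx
  rw [pyGetD_take_eq hx.1 (by omega)]

lemma runA_noWall (key : Int → Int × Int) (hkey : Function.Injective key)
    (l : List Int) (hl : ∀ v ∈ l, v ≠ 1) (j0 : Int)
    (d : PySem.Dict (Int × Int) Nat) (store : PySem.Dict Nat Int) (cur next : Nat) :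
    (runA key l j0 (d, store, cur, next)).2.2.1 = cur ∧
    (runA key l j0 (d, store, cur, next)).2.2.2 = next ∧
    (∀ k, (runA key l j0 (d, store, cur, next)).2.1.getD k 0 =
        if k = cur then store.getD cur 0 + (l.count 2 : Int) else store.getD k 0) ∧
    (∀ q, (∀ p : Nat, p < l.length → q ≠ key (j0 + p)) →
        (runA key l j0 (d, store, cur, next)).1.get? q = d.get? q) ∧
    (∀ p : Nat, p < l.length →
        (runA key l j0 (d, store, cur, next)).1.get? (key (j0 + p)) = some cur) := by
  induction l generalizing j0 d store with
  | nil => simp [runA, PySem.List.enumerate]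
  | cons v t ih =>
    have hv : v ≠ 1 := hl v (by simp)
    have hlt : ∀ w ∈ t, w ≠ 1 := fun w hw => hl w (by simp [hw])
    have hstep : runA key (v :: t) j0 (d, store, cur, next) =
        runA key t (j0 + 1) (d.insert (key j0) cur,
          if v == 2 then store.modify cur 0 (· + 1) else store, cur, next) := by
      rw [runA, PySem.List.enumerate_cons, List.foldl_cons, runA]
      congr 1
      simp only [stepA]
      by_cases h2 : v = 2
      · simp [h2]
      · simp [h2, hv]
    rw [hstep]
    obtain ⟨ih1, ih2, ih3, ih4, ih5⟩ := ih hlt (j0 + 1) (d.insert (key j0) cur)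
      (if v == 2 then store.modify cur 0 (· + 1) else store)
    refine ⟨ih1, ih2, ?_, ?_, ?_⟩
    · intro k
      rw [ih3 k]
      by_cases hk : k = cur
      · subst hk
        by_cases h2 : v = 2
        · simp [h2, PySem.Dict.getD_modify_self]
          ring
        · have : (v :: t).count 2 = t.count 2 := by
            simp [List.count_cons]; omega
          simp [h2, this]
      · by_cases h2 : v = 2
        · simp [hk, h2, PySem.Dict.getD_modify_of_ne _ _ _ hk]
        · simp [hk, h2]
    · intro q hq
      rw [ih4 q (fun p hp => by
        have := hq (p + 1) (by simpa using Nat.succ_lt_succ hp)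
        push_cast at this ⊢
        convert this using 2
        ring)]
      apply PySem.Dict.get?_insert_of_ne
      have := hq 0 (by simp)
      simpa using this
    · intro p hp
      cases p with
      | zero =>
        have hz : key (j0 + ((0 : Nat) : Int)) = key j0 := by norm_num
        rw [hz, ih4 (key j0) (fun p' hp' hcontra => by
          have := hkey hcontra
          omega)]
        exact PySem.Dict.get?_insert_self d (key j0) cur
      | succ p' =>
        have := ih5 p' (by simpa using Nat.lt_of_succ_lt_succ hp)
        convert this using 3
        push_cast; ring

def segCount (l : List Int) (p : Nat) : Int :=
  (((l.take p).reverse.takeWhile (fun v => !(v == 1))).count 2 : Int) +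
  (((l.drop p).takeWhile (fun v => !(v == 1))).count 2 : Int)

lemma takeWhile_all (l : List Int) (hl : ∀ v ∈ l, v ≠ 1) :
    l.takeWhile (fun v => !(v == 1)) = l := by
  rw [List.takeWhile_eq_self_iff]
  intro a ha; simpa using hl a ha

lemma count_take_drop (l : List Int) (p : Nat) :
    (l.take p).count 2 + (l.drop p).count 2 = l.count 2 := by
  conv_rhs => rw [← List.take_append_drop p l]
  rw [List.count_append]

lemma segCount_noWall (l : List Int) (hl : ∀ v ∈ l, v ≠ 1) (p : Nat) :
    segCount l p = (l.count 2 : Int) := by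
  have h1 : ∀ v ∈ (l.take p).reverse, v ≠ 1 := fun v hv => hl v (by
    simp at hv; exact List.mem_of_mem_take hv)
  have h2 : ∀ v ∈ l.drop p, v ≠ 1 := fun v hv => hl v (List.mem_of_mem_drop hv)
  rw [segCount, takeWhile_all _ h1, takeWhile_all _ h2, List.count_reverse]
  have := count_take_drop l p
  omega

lemma takeWhile_wall (rest : List Int) :
    (1 :: rest).takeWhile (fun v => !(v == (1:Int))) = [] := by
  simp [List.takeWhile]

lemma segCount_first (seg rest : List Int) (hseg : ∀ v ∈ seg, v ≠ 1)
    (p : Nat) (hp : p < seg.length) :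
    segCount (seg ++ 1 :: rest) p = (seg.count 2 : Int) := by
  have htake : (seg ++ 1 :: rest).take p = seg.take p := by
    rw [List.take_append, Nat.sub_eq_zero_of_le (le_of_lt hp)]
    simp
  have hdrop : (seg ++ 1 :: rest).drop p = seg.drop p ++ 1 :: rest := by
    rw [List.drop_append_of_le_length (by omega)]
  have h1 : ∀ v ∈ (seg.take p).reverse, v ≠ 1 := fun v hv => hseg v (by
    simp at hv; exact List.mem_of_mem_take hv)
  have h2 : ∀ v ∈ seg.drop p, v ≠ 1 := fun v hv => hseg v (List.mem_of_mem_drop hv)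
  have hd : (seg.drop p ++ 1 :: rest).takeWhile (fun v => !(v == 1)) = seg.drop p := by
    rw [List.takeWhile_append, takeWhile_all _ h2]
    simp [takeWhile_wall rest]
  rw [segCount, htake, hdrop, takeWhile_all _ h1, hd, List.count_reverse]
  have := count_take_drop seg p
  omega

lemma segCount_rest (seg rest : List Int) (p : Nat) :
    segCount (seg ++ 1 :: rest) (seg.length + 1 + p) = segCount rest p := by
  have harith : seg.length + 1 + p - seg.length = p + 1 := by omega
  have htake : (seg ++ 1 :: rest).take (seg.length + 1 + p) = seg ++ 1 :: rest.take p := by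
    rw [List.take_append, List.take_of_length_le (by omega), harith]
    simp
  have hdrop : (seg ++ 1 :: rest).drop (seg.length + 1 + p) = rest.drop p := by
    rw [List.drop_append, harith, List.drop_eq_nil_of_le (by omega)]
    simp
  rw [segCount, segCount, htake, hdrop]
  congr 2
  have hrev : (seg ++ 1 :: rest.take p).reverse = (rest.take p).reverse ++ 1 :: seg.reverse := by
    simp
  rw [hrev, List.takeWhile_append]
  split
  · next h =>
    rw [takeWhile_wall]
    simp [List.Sublist.eq_of_length (List.takeWhile_sublist _) h]
  · rfl

lemma runA_spec (key : Int → Int × Int) (hkey : Function.Injective key) :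
    ∀ (N : Nat) (l : List Int), l.length ≤ N → ∀ (j0 : Int)
    (d : PySem.Dict (Int × Int) Nat) (store : PySem.Dict Nat Int) (cur next : Nat),
    cur < next → store.getD cur 0 = 0 →
    (next ≤ (runA key l j0 (d, store, cur, next)).2.2.2) ∧
    ((runA key l j0 (d, store, cur, next)).2.2.1 = cur ∨
      next ≤ (runA key l j0 (d, store, cur, next)).2.2.1) ∧
    ((runA key l j0 (d, store, cur, next)).2.2.1 < (runA key l j0 (d, store, cur, next)).2.2.2) ∧
    (∀ id, id < next → id ≠ cur →
        (runA key l j0 (d, store, cur, next)).2.1.getD id 0 = store.getD id 0) ∧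
    (∀ q, (∀ p : Nat, p < l.length → q ≠ key (j0 + p)) →
        (runA key l j0 (d, store, cur, next)).1.get? q = d.get? q) ∧
    (∀ p : Nat, (hp : p < l.length) → l[p] ≠ 1 →
        ∃ a, (runA key l j0 (d, store, cur, next)).1.get? (key (j0 + p)) = some a ∧
          a < (runA key l j0 (d, store, cur, next)).2.2.2 ∧
          (runA key l j0 (d, store, cur, next)).2.1.getD a 0 = segCount l p) := by
  intro N
  induction N with
  | zero =>
    intro l hl j0 d store cur next hcn h0
    have : l = [] := List.length_eq_zero_iff.mp (by omega)
    subst this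
    simp [runA, PySem.List.enumerate]
    omega
  | succ N ih =>
    intro l hl j0 d store cur next hcn h0
    -- decompose l at the first wall
    rcases hdw : l.dropWhile (fun v => !(v == 1)) with _ | ⟨w, rest⟩
    · -- no wall in l
      have hseg : ∀ v ∈ l, v ≠ 1 := by
        intro v hv
        have := List.dropWhile_eq_nil_iff.mp hdw v hv
        simpa using this
      obtain ⟨n1, n2, n3, n4, n5⟩ := runA_noWall key hkey l hseg j0 d store cur next
      refine ⟨by omega, by omega, by omega, ?_, n4, ?_⟩
      · intro id hid hne
        rw [n3 id, if_neg hne]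
      · intro p hp hv
        refine ⟨cur, n5 p hp, by omega, ?_⟩
        rw [n3 cur, if_pos rfl, h0, segCount_noWall l hseg p]
        ring
    · -- l = seg ++ 1 :: rest
      have hw1 : w = 1 := by
        have := List.head?_dropWhile_not (fun v => !(v == (1:Int))) l
        rw [hdw] at this
        simpa using this
      subst hw1
      set seg := l.takeWhile (fun v => !(v == 1)) with hsegdef
      have hdecomp : l = seg ++ 1 :: rest := by
        rw [hsegdef, ← hdw, List.takeWhile_append_dropWhile]
      have hsegfree : ∀ v ∈ seg, v ≠ 1 := by
        intro v hv
        simpa using List.mem_takeWhile_imp hv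
      have hrestlen : rest.length ≤ N := by
        have := congrArg List.length hdecomp
        simp at this
        omega
      -- unfold the run along the decomposition
      have hsplit : runA key l j0 (d, store, cur, next) =
          runA key rest (j0 + seg.length + 1)
            (stepA key (runA key seg j0 (d, store, cur, next)) (j0 + seg.length, 1)) := by
        rw [hdecomp, runA, PySem.List.enumerate_append, PySem.List.enumerate_cons,
          List.foldl_append, List.foldl_cons]
        rfl
      obtain ⟨n1, n2, n3, n4, n5⟩ := runA_noWall key hkey seg hsegfree j0 d store cur next
      set s1 := runA key seg j0 (d, store, cur, next) with hs1
      have hstep : stepA key s1 (j0 + seg.length, 1) =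
          (s1.1.insert (key (j0 + seg.length)) next, s1.2.1.insert next 0, next, next + 1) := by
        rw [stepA]
        norm_num
        rw [n2]
        exact ⟨rfl, rfl, rfl⟩
      rw [hstep] at hsplit
      obtain ⟨i1, i2, i3, i4, i5, i6⟩ := ih rest hrestlen (j0 + seg.length + 1)
        (s1.1.insert (key (j0 + seg.length)) next) (s1.2.1.insert next 0) next (next + 1)
        (by omega) (PySem.Dict.getD_insert_self _ _ _ _)
      rw [← hsplit] at i1 i2 i3 i4 i5 i6
      set r := runA key l j0 (d, store, cur, next) with hr
      have hlen : l.length = seg.length + 1 + rest.length := by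
        rw [hdecomp]; simp; omega
      refine ⟨by omega, by omega, by omega, ?_, ?_, ?_⟩
      · -- (2) old ids frozen
        intro id hid hne
        rw [i4 id (by omega) (by omega), PySem.Dict.getD_insert_of_ne _ _ _ (by omega),
          n3 id, if_neg hne]
      · -- (3) untouched keys
        intro q hq
        rw [i5 q (fun p hp => by
          have := hq (seg.length + 1 + p) (by omega)
          push_cast at this ⊢
          convert this using 2
          ring), PySem.Dict.get?_insert_of_ne _ _ (hq seg.length (by omega)),
          n4 q (fun p hp => hq p (by omega))]
      · -- (4) recorded cells
        intro p hp hv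
        rcases lt_trichotomy p seg.length with hps | hps | hps
        · -- first segment
          refine ⟨cur, ?_, by omega, ?_⟩
          · rw [i5 (key (j0 + p)) (fun p' hp' hcontra => by
              obtain h := hkey hcontra
              omega), PySem.Dict.get?_insert_of_ne _ _ (by
                intro hcontra
                obtain h := hkey hcontra
                omega)]
            exact n5 p hps
          · rw [i4 cur (by omega) (by omega), PySem.Dict.getD_insert_of_ne _ _ _ (by omega),
              n3 cur, if_pos rfl, h0]
            have : segCount l p = (seg.count 2 : Int) := by
              rw [hdecomp]
              exact segCount_first seg rest hsegfree p hps
            rw [this]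
            ring
        · -- the wall itself: value is 1, contradiction
          exfalso
          apply hv
          have hval := List.getElem_of_eq hdecomp hp
          rw [hval, List.getElem_append_right (by omega)]
          simp [hps]
        · -- past the wall
          obtain ⟨p', hp'⟩ : ∃ p', p = seg.length + 1 + p' := ⟨p - seg.length - 1, by omega⟩
          subst hp'
          have hp'lt : p' < rest.length := by omega
          have hvr : rest[p'] ≠ 1 := by
            intro hcontra
            apply hv
            have hval := List.getElem_of_eq hdecomp hp
            rw [hval, List.getElem_append_right (by omega)]
            simp only [List.getElem_cons]
            rw [dif_neg (by omega)]
            convert hcontra using 2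
            omega
          obtain ⟨a, ha1, ha2, ha3⟩ := i6 p' hp'lt hvr
          refine ⟨a, ?_, by omega, ?_⟩
          · rw [← ha1]
            congr 2
            push_cast
            ring
          · rw [ha3, hdecomp, segCount_rest]

def outerPass (kf : Int → Int → Int × Int) (mm : Nat) (lines : List (List Int)) (o0 : Int)
    (st : PySem.Dict (Int × Int) Nat × PySem.Dict Nat Int × Nat) :
    PySem.Dict (Int × Int) Nat × PySem.Dict Nat Int × Nat :=
  (PySem.List.enumerate lines o0).foldl
    (fun st p =>
      let inner := runA (kf p.1) (p.2.take mm) 0 (st.1, st.2.1.insert st.2.2 0, st.2.2, st.2.2 + 1)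
      (inner.1, inner.2.1, inner.2.2.2))
    st

lemma outerPass_spec (kf : Int → Int → Int × Int)
    (hkf : ∀ o t o' t', kf o t = kf o' t' → o = o' ∧ t = t') (mm : Nat) :
    ∀ (lines : List (List Int)) (o0 : Int)
    (d : PySem.Dict (Int × Int) Nat) (store : PySem.Dict Nat Int) (next : Nat),
    (next ≤ (outerPass kf mm lines o0 (d, store, next)).2.2) ∧
    (∀ id, id < next →
        (outerPass kf mm lines o0 (d, store, next)).2.1.getD id 0 = store.getD id 0) ∧
    (∀ q, (∀ k : Nat, k < lines.length → ∀ t, q ≠ kf (o0 + k) t) →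
        (outerPass kf mm lines o0 (d, store, next)).1.get? q = d.get? q) ∧
    (∀ (k : Nat) (hk : k < lines.length) (p : Nat) (hp : p < (lines[k].take mm).length),
        (lines[k].take mm)[p] ≠ 1 →
        (outerPass kf mm lines o0 (d, store, next)).2.1.getD
            ((outerPass kf mm lines o0 (d, store, next)).1.getD (kf (o0 + k) p) 0) 0
          = segCount (lines[k].take mm) p) := by
  intro lines
  induction lines with
  | nil =>
    intro o0 d store next
    refine ⟨le_refl _, fun _ _ => rfl, fun _ _ => rfl, fun k hk => by simp at hk⟩
  | cons line rest ih =>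
    intro o0 d store next
    have hkinj : Function.Injective (kf o0) := fun a b hab => (hkf _ _ _ _ hab).2
    obtain ⟨a1, a2, a3, a4, a5, a6⟩ := runA_spec (kf o0) hkinj (line.take mm).length
      (line.take mm) (le_refl _) 0 d (store.insert next 0) next (next + 1)
      (by omega) (PySem.Dict.getD_insert_self _ _ _ _)
    set r1 := runA (kf o0) (line.take mm) 0 (d, store.insert next 0, next, next + 1) with hr1
    have hunf : outerPass kf mm (line :: rest) o0 (d, store, next)
        = outerPass kf mm rest (o0 + 1) (r1.1, r1.2.1, r1.2.2.2) := by
      rw [outerPass, PySem.List.enumerate_cons, List.foldl_cons]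
      rfl
    obtain ⟨b1, b2, b3, b4⟩ := ih (o0 + 1) r1.1 r1.2.1 r1.2.2.2
    rw [← hunf] at b1 b2 b3 b4
    refine ⟨by omega, ?_, ?_, ?_⟩
    · -- old ids frozen
      intro id hid
      rw [b2 id (by omega), a4 id (by omega) (by omega),
        PySem.Dict.getD_insert_of_ne _ _ _ (by omega)]
    · -- untouched keys
      intro q hq
      rw [b3 q (fun k hk t => by
        have := hq (k + 1) (by simpa using Nat.succ_lt_succ hk) t
        push_cast at this ⊢
        convert this using 2
        ring), a5 q (fun p hp => by
          have := hq 0 (by simp) p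
          simpa using this)]
    · -- recorded cells
      intro k hk p hp hv
      cases k with
      | zero =>
        obtain ⟨a, ha1, ha2, ha3⟩ := a6 p (by simpa using hp) (by simpa using hv)
        have hget : (outerPass kf mm (line :: rest) o0 (d, store, next)).1.get?
            (kf (o0 + ((0:Nat):Int)) p) = some a := by
          push_cast
          rw [b3 _ (fun k' hk' t hcontra => by
            obtain ⟨ho, _⟩ := hkf _ _ _ _ hcontra
            omega)]
          simpa using ha1
        rw [PySem.Dict.getD_of_get?_eq_some _ _ hget, b2 a ha2]
        simpa using ha3
      | succ k' =>
        have := b4 k' (by simpa using Nat.lt_of_succ_lt_succ hk) p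
          (by simpa using hp) (by simpa using hv)
        have harg : o0 + 1 + ((k' : Nat) : Int) = o0 + (((k' + 1 : Nat)) : Int) := by
          push_cast; ring
        rw [harg] at this
        convert this using 3

def stepB (s : List Int × List Int) (v : Int) : List Int × List Int :=
  if v == 1 then (s.1 ++ List.replicate s.2.length ((PySem.List.count s.2 2 : Nat) : Int) ++ [0], [])
  else (s.1, s.2 ++ [v])

lemma segTotals_eq_stepB (line : List Int) :
    segTotals line =
      (line.foldl stepB ([], [])).1 ++
        List.replicate (line.foldl stepB ([], [])).2.length
          ((PySem.List.count (line.foldl stepB ([], [])).2 2 : Nat) : Int) := rfl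

lemma stepB_prefix (l : List Int) : ∀ (out seg : List Int),
    (l.foldl stepB (out, seg)).1 = out ++ (l.foldl stepB ([], seg)).1 ∧
    (l.foldl stepB (out, seg)).2 = (l.foldl stepB ([], seg)).2 := by
  induction l with
  | nil => intro out seg; simp
  | cons v t ih =>
    intro out seg
    by_cases h1 : v = 1
    · subst h1
      simp only [List.foldl_cons, stepB]
      norm_num
      obtain ⟨p1, p2⟩ := ih (out ++ (List.replicate seg.length ((List.count 2 seg : Nat) : Int) ++ [0])) []
      obtain ⟨q1, q2⟩ := ih (List.replicate seg.length ((List.count 2 seg : Nat) : Int) ++ [0]) []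
      constructor
      · rw [p1, q1]
        simp
      · rw [p2, q2]
    · simp only [List.foldl_cons, stepB, if_neg (show ¬((v == (1:Int)) = true) by simp [h1])]
      exact ih out (seg ++ [v])

lemma foldB_noWall (l : List Int) (hl : ∀ v ∈ l, v ≠ 1) : ∀ (out seg : List Int),
    l.foldl stepB (out, seg) = (out, seg ++ l) := by
  induction l with
  | nil => intro out seg; simp
  | cons v t ih =>
    intro out seg
    have hv : v ≠ 1 := hl v (by simp)
    simp only [List.foldl_cons, stepB, if_neg (show ¬((v == (1:Int)) = true) by simp [hv])]
    rw [ih (fun w hw => hl w (by simp [hw])) out (seg ++ [v])]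
    simp
lemma segTotals_noWall (l : List Int) (hl : ∀ v ∈ l, v ≠ 1) :
    segTotals l = List.replicate l.length ((l.count 2 : Nat) : Int) := by
  rw [segTotals_eq_stepB, foldB_noWall l hl]
  simp [PySem.List.count]

lemma segTotals_decomp (seg rest : List Int) (hseg : ∀ v ∈ seg, v ≠ 1) :
    segTotals (seg ++ 1 :: rest) =
      List.replicate seg.length ((seg.count 2 : Nat) : Int) ++ [0] ++ segTotals rest := by
  rw [segTotals_eq_stepB, List.foldl_append, foldB_noWall seg hseg, List.foldl_cons]
  have hwall : stepB ([], [] ++ seg) 1 =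
      (List.replicate seg.length ((seg.count 2 : Nat) : Int) ++ [0], []) := by
    simp [stepB, PySem.List.count]
  rw [hwall]
  obtain ⟨p1, p2⟩ := stepB_prefix rest (List.replicate seg.length ((seg.count 2 : Nat) : Int) ++ [0]) []
  rw [p1, p2, segTotals_eq_stepB]
  simp

lemma segTotals_spec : ∀ (N : Nat) (l : List Int), l.length ≤ N →
    (segTotals l).length = l.length ∧
    (∀ p : Nat, (hp : p < l.length) → l[p] ≠ 1 → (segTotals l).getD p 0 = segCount l p) := by
  intro N
  induction N with
  | zero =>
    intro l hl
    have : l = [] := List.length_eq_zero_iff.mp (by omega)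
    subst this
    simp [segTotals]
  | succ N ih =>
    intro l hl
    rcases hdw : l.dropWhile (fun v => !(v == 1)) with _ | ⟨w, rest⟩
    · have hseg : ∀ v ∈ l, v ≠ 1 := by
        intro v hv
        have := List.dropWhile_eq_nil_iff.mp hdw v hv
        simpa using this
      rw [segTotals_noWall l hseg]
      refine ⟨by simp, ?_⟩
      intro p hp hv
      rw [List.getD_eq_getElem?_getD, List.getElem?_replicate]
      rw [if_pos hp]
      rw [segCount_noWall l hseg p]
      simp
    · have hw1 : w = 1 := by
        have := List.head?_dropWhile_not (fun v => !(v == (1:Int))) l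
        rw [hdw] at this
        simpa using this
      subst hw1
      set seg := l.takeWhile (fun v => !(v == 1)) with hsegdef
      have hdecomp : l = seg ++ 1 :: rest := by
        rw [hsegdef, ← hdw, List.takeWhile_append_dropWhile]
      have hsegfree : ∀ v ∈ seg, v ≠ 1 := by
        intro v hv
        simpa using List.mem_takeWhile_imp hv
      have hlen : l.length = seg.length + 1 + rest.length := by
        rw [hdecomp]; simp; omega
      have hrestlen : rest.length ≤ N := by omega
      obtain ⟨ihl, ihg⟩ := ih rest hrestlen
      have hdc := segTotals_decomp seg rest hsegfree
      rw [hdecomp, hdc]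
      constructor
      · simp [ihl]
      · intro p hp hv
        rcases lt_trichotomy p seg.length with hps | hps | hps
        · rw [List.getD_append _ _ _ _ (by simp; omega)]
          rw [List.getD_append _ _ _ _ (by simp; omega)]
          rw [List.getD_eq_getElem?_getD, List.getElem?_replicate, if_pos hps]
          rw [segCount_first seg rest hsegfree p hps]
          simp
        · exfalso
          apply hv
          subst hps
          rw [List.getElem_append_right (by omega)]
          simp
        · obtain ⟨p', hp'⟩ : ∃ p', p = seg.length + 1 + p' := ⟨p - seg.length - 1, by omega⟩
          subst hp'
          rw [List.getD_append_right _ _ _ _ (by simp)]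
          have harg : seg.length + 1 + p' - (List.replicate seg.length ((seg.count 2 : Nat) : Int) ++ [0]).length = p' := by
            simp
          rw [harg]
          have hp'lt : p' < rest.length := by
            simp at hp
            omega
          have hvr : rest[p']'hp'lt ≠ 1 := by
            intro hcontra
            apply hv
            rw [List.getElem_append_right (by omega)]
            simp only [List.getElem_cons]
            rw [dif_neg (by omega)]
            convert hcontra using 2
            omega
          rw [ihg p' (by omega) hvr, segCount_rest]

-- ===== assembly =====

def rowsPort (matrix : List (List Int)) (n m : Int) :
    PySem.Dict (Int × Int) Nat × PySem.Dict Nat Int × Nat :=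
  (PySem.List.pyRange 0 n 1).foldl
    (fun (st : PySem.Dict (Int × Int) Nat × PySem.Dict Nat Int × Nat) i =>
      let inner :=
        (PySem.List.pyRange 0 m 1).foldl
          (fun (s : PySem.Dict (Int × Int) Nat × PySem.Dict Nat Int × Nat × Nat) j =>
            let v := PySem.List.pyGetD (PySem.List.pyGetD matrix i []) j 0
            if v == 2 then (s.1.insert (i, j) s.2.2.1, s.2.1.modify s.2.2.1 0 (· + 1), s.2.2.1, s.2.2.2)
            else if v == 1 then (s.1.insert (i, j) s.2.2.2, s.2.1.insert s.2.2.2 0, s.2.2.2, s.2.2.2 + 1)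
            else (s.1.insert (i, j) s.2.2.1, s.2.1, s.2.2.1, s.2.2.2))
          (st.1, st.2.1.insert st.2.2 0, st.2.2, st.2.2 + 1)
      (inner.1, inner.2.1, inner.2.2.2))
    (PySem.Dict.empty, PySem.Dict.empty, 0)

def colsPort (matrix : List (List Int)) (n m : Int) :
    PySem.Dict (Int × Int) Nat × PySem.Dict Nat Int × Nat :=
  (PySem.List.pyRange 0 m 1).foldl
    (fun (st : PySem.Dict (Int × Int) Nat × PySem.Dict Nat Int × Nat) j =>
      let inner :=
        (PySem.List.pyRange 0 n 1).foldl
          (fun (s : PySem.Dict (Int × Int) Nat × PySem.Dict Nat Int × Nat × Nat) i =>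
            let v := PySem.List.pyGetD (PySem.List.pyGetD matrix i []) j 0
            if v == 2 then (s.1.insert (i, j) s.2.2.1, s.2.1.modify s.2.2.1 0 (· + 1), s.2.2.1, s.2.2.2)
            else if v == 1 then (s.1.insert (i, j) s.2.2.2, s.2.1.insert s.2.2.2 0, s.2.2.2, s.2.2.2 + 1)
            else (s.1.insert (i, j) s.2.2.1, s.2.1, s.2.2.1, s.2.2.2))
          (st.1, st.2.1.insert st.2.2 0, st.2.2, st.2.2 + 1)
      (inner.1, inner.2.1, inner.2.2.2))
    (PySem.Dict.empty, PySem.Dict.empty, 0)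

lemma solve_eq (matrix : List (List Int)) :
    solve matrix =
      (PySem.List.pyRange 0 (matrix.length : Int) 1).foldl
        (fun ans i =>
          (PySem.List.pyRange 0 ((PySem.List.pyGetD matrix 0 []).length : Int) 1).foldl
            (fun ans j =>
              if PySem.List.pyGetD (PySem.List.pyGetD matrix i []) j 0 == 0 then
                max ans
                  ((rowsPort matrix (matrix.length : Int) ((PySem.List.pyGetD matrix 0 []).length : Int)).2.1.getD
                      ((rowsPort matrix (matrix.length : Int) ((PySem.List.pyGetD matrix 0 []).length : Int)).1.getD (i, j) 0) 0 +
                   (colsPort matrix (matrix.length : Int) ((PySem.List.pyGetD matrix 0 []).length : Int)).2.1.getD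
                      ((colsPort matrix (matrix.length : Int) ((PySem.List.pyGetD matrix 0 []).length : Int)).1.getD (i, j) 0) 0)
              else ans)
            ans)
        0 := rfl

lemma rows_to_outer (matrix : List (List Int)) (m : Int) (h0 : 0 ≤ m)
    (hm : ∀ row ∈ matrix, m ≤ (row.length : Int)) :
    rowsPort matrix (matrix.length : Int) m
      = outerPass (fun o t => (o, t)) m.toNat matrix 0 (PySem.Dict.empty, PySem.Dict.empty, 0) := by
  rw [rowsPort, outerPass, PySem.List.enumerate_eq_map_pyRange matrix ([] : List Int),
    List.foldl_map, PySem.List.len_eq]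
  apply PySem.List.foldl_congr_mem
  intro st i hi
  rw [PySem.List.mem_pyRange_one] at hi
  have hmem : PySem.List.pyGetD matrix i [] ∈ matrix := by
    rw [PySem.List.pyGetD_eq_getElem matrix [] hi.1 (by exact_mod_cast hi.2)]
    exact List.getElem_mem _
  exact congrArg (fun x => (x.1, x.2.1, x.2.2.2))
    (inner_bridge (fun t => (i, t)) (PySem.List.pyGetD matrix i []) m h0 (hm _ hmem)
      (st.1, st.2.1.insert st.2.2 0, st.2.2, st.2.2 + 1))

def colLinesOf (matrix : List (List Int)) (m : Int) : List (List Int) :=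
  (PySem.List.pyRange 0 m 1).map (fun j => matrix.map (fun r => PySem.List.pyGetD r j 0))

lemma cols_to_outer (matrix : List (List Int)) (m : Int) (h0 : 0 ≤ m) :
    colsPort matrix (matrix.length : Int) m
      = outerPass (fun o t => (t, o)) matrix.length (colLinesOf matrix m) 0
          (PySem.Dict.empty, PySem.Dict.empty, 0) := by
  rw [colsPort, outerPass, PySem.List.enumerate_eq_map_pyRange (colLinesOf matrix m) ([] : List Int),
    List.foldl_map, PySem.List.len_eq, colLinesOf]
  have hlen : (((PySem.List.pyRange 0 m 1).map
      (fun j => matrix.map (fun r => PySem.List.pyGetD r j 0))).length : Int) = m := by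
    rw [List.length_map]
    have hm' : m = ((m.toNat : Nat) : Int) := (Int.toNat_of_nonneg h0).symm
    rw [hm', PySem.List.pyRange_zero_natCast m.toNat]
    simp
  rw [hlen]
  apply PySem.List.foldl_congr_mem
  intro st j hj
  rw [PySem.List.mem_pyRange_one] at hj
  have hcl : PySem.List.pyGetD
      ((PySem.List.pyRange 0 m 1).map (fun j => matrix.map (fun r => PySem.List.pyGetD r j 0))) j []
        = matrix.map (fun r => PySem.List.pyGetD r j 0) := by
    have hm' : m = ((m.toNat : Nat) : Int) := (Int.toNat_of_nonneg h0).symm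
    have hj' : j = ((j.toNat : Nat) : Int) := (Int.toNat_of_nonneg hj.1).symm
    rw [hj', hm']
    exact PySem.List.pyGetD_map_pyRange _ m.toNat j.toNat [] (by omega)
  rw [hcl]
  have hfix : (PySem.List.pyRange 0 ((matrix.length : Nat) : Int) 1).foldl
      (fun (s : PySem.Dict (Int × Int) Nat × PySem.Dict Nat Int × Nat × Nat) i =>
        let v := PySem.List.pyGetD (PySem.List.pyGetD matrix i []) j 0
        if v == 2 then (s.1.insert (i, j) s.2.2.1, s.2.1.modify s.2.2.1 0 (· + 1), s.2.2.1, s.2.2.2)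
        else if v == 1 then (s.1.insert (i, j) s.2.2.2, s.2.1.insert s.2.2.2 0, s.2.2.2, s.2.2.2 + 1)
        else (s.1.insert (i, j) s.2.2.1, s.2.1, s.2.2.1, s.2.2.2))
      (st.1, st.2.1.insert st.2.2 0, st.2.2, st.2.2 + 1)
      = (PySem.List.pyRange 0 ((matrix.length : Nat) : Int) 1).foldl
        (fun s i => stepA (fun t => (t, j)) s
          (i, PySem.List.pyGetD (matrix.map (fun r => PySem.List.pyGetD r j 0)) i 0))
        (st.1, st.2.1.insert st.2.2 0, st.2.2, st.2.2 + 1) := by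
    apply PySem.List.foldl_congr_mem
    intro acc x hx
    have hv : PySem.List.pyGetD (matrix.map (fun r => PySem.List.pyGetD r j 0)) x 0
        = PySem.List.pyGetD (PySem.List.pyGetD matrix x []) j 0 :=
      by
        have hnil : PySem.List.pyGetD ([] : List Int) j 0 = 0 := by
          simp [PySem.List.pyGetD, PySem.List.pyGet?, PySem.List.pyIdx?]
        have hv0 := PySem.List.pyGetD_map (fun r => PySem.List.pyGetD r j 0) matrix x []
        rw [hnil] at hv0
        exact hv0
    rw [hv]
    simp only [stepA]
  have hb := inner_bridge (fun t => (t, j)) (matrix.map (fun r => PySem.List.pyGetD r j 0))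
      ((matrix.length : Nat) : Int) (by positivity)
      (by rw [List.length_map])
      (st.1, st.2.1.insert st.2.2 0, st.2.2, st.2.2 + 1)
  exact congrArg (fun x => (x.1, x.2.1, x.2.2.2)) (hfix.trans hb)

def canonVal (matrix : List (List Int)) (n m : Int) : Int :=
  (PySem.List.pyRange 0 n 1).foldl
    (fun ans i =>
      (PySem.List.pyRange 0 m 1).foldl
        (fun ans j =>
          if PySem.List.pyGetD (PySem.List.pyGetD matrix i []) j 0 == 0 then
            max ans
              (segCount ((PySem.List.pyGetD matrix i []).take m.toNat) j.toNat +
               segCount (matrix.map (fun r => PySem.List.pyGetD r j 0)) i.toNat)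
          else ans)
        ans)
    0

lemma A_to_canon (matrix : List (List Int))
    (hm : ∀ row ∈ matrix, ((PySem.List.pyGetD matrix 0 []).length : Int) ≤ (row.length : Int)) :
    solve matrix
      = canonVal matrix (matrix.length : Int) ((PySem.List.pyGetD matrix 0 []).length : Int) := by
  set m : Int := ((PySem.List.pyGetD matrix 0 []).length : Int) with hmdef
  have h0m : 0 ≤ m := by positivity
  rw [solve_eq, rows_to_outer matrix m h0m hm, cols_to_outer matrix m h0m, canonVal]
  obtain ⟨_, _, _, r4⟩ := outerPass_spec (fun o t => ((o : Int), (t : Int)))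
    (by intro o t o' t' h; simpa using h) m.toNat matrix 0 PySem.Dict.empty PySem.Dict.empty 0
  obtain ⟨_, _, _, c4⟩ := outerPass_spec (fun o t => ((t : Int), (o : Int)))
    (by intro o t o' t' h; simp at h; exact ⟨h.2, h.1⟩) matrix.length (colLinesOf matrix m) 0
    PySem.Dict.empty PySem.Dict.empty 0
  apply PySem.List.foldl_congr_mem
  intro ans i hi
  apply PySem.List.foldl_congr_mem
  intro a2 j hj
  rw [PySem.List.mem_pyRange_one] at hi hj
  by_cases hc : PySem.List.pyGetD (PySem.List.pyGetD matrix i []) j 0 = 0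
  · rw [if_pos (by simpa using hc), if_pos (by simpa using hc)]
    have hilt : i.toNat < matrix.length := by omega
    have hrowi : matrix[i.toNat]'hilt = PySem.List.pyGetD matrix i [] :=
      (PySem.List.pyGetD_eq_getElem matrix [] hi.1 (by exact_mod_cast hi.2)).symm
    have hmrow : m ≤ ((matrix[i.toNat]'hilt).length : Int) := by
      rw [hrowi]
      exact hm _ (by rw [← hrowi]; exact List.getElem_mem _)
    have hjrow : j < ((matrix[i.toNat]'hilt).length : Int) := by omega
    have hvrow : PySem.List.pyGetD (PySem.List.pyGetD matrix i []) j 0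
        = (matrix[i.toNat]'hilt)[j.toNat]'(by omega) := by
      conv_lhs => rw [← hrowi]
      exact PySem.List.pyGetD_eq_getElem _ 0 hj.1 (by exact_mod_cast hjrow)
    -- rows side
    have hplen : j.toNat < ((matrix[i.toNat]'hilt).take m.toNat).length := by
      simp [List.length_take]
      omega
    have hvne : ((matrix[i.toNat]'hilt).take m.toNat)[j.toNat]'hplen ≠ 1 := by
      rw [List.getElem_take]
      rw [hvrow] at hc
      omega
    have hrow := r4 i.toNat hilt j.toNat hplen hvne
    have hkeyr : (((0 : Int) + (i.toNat : Int), ((j.toNat : Nat) : Int)) : Int × Int) = (i, j) := by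
      simp [Int.toNat_of_nonneg hi.1, Int.toNat_of_nonneg hj.1]
    rw [hkeyr] at hrow
    -- cols side
    have hcll : j.toNat < (colLinesOf matrix m).length := by
      rw [colLinesOf, List.length_map]
      have hm' : m = ((m.toNat : Nat) : Int) := (Int.toNat_of_nonneg h0m).symm
      rw [hm', PySem.List.pyRange_zero_natCast m.toNat]
      simp
      omega
    have hclj : (colLinesOf matrix m)[j.toNat]'hcll = matrix.map (fun r => PySem.List.pyGetD r j 0) := by
      apply (List.getElem_eq_iff hcll).mpr
      rw [colLinesOf]
      have hm' : m = ((m.toNat : Nat) : Int) := (Int.toNat_of_nonneg h0m).symm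
      conv_lhs => rw [hm', PySem.List.pyRange_zero_natCast m.toNat]
      have hjm : j.toNat < m.toNat := by omega
      rw [List.getElem?_map, List.getElem?_map, List.getElem?_range hjm]
      simp [Int.toNat_of_nonneg hj.1]
    have e1 : ((colLinesOf matrix m)[j.toNat]'hcll).take matrix.length
        = matrix.map (fun r => PySem.List.pyGetD r j 0) := by
      rw [hclj, List.take_of_length_le (by simp)]
    have hple2 : i.toNat < (((colLinesOf matrix m)[j.toNat]'hcll).take matrix.length).length := by
      rw [e1]
      simp
      omega
    have hvne2 : ((((colLinesOf matrix m)[j.toNat]'hcll).take matrix.length)[i.toNat]'hple2) ≠ 1 := by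
      have hv2 : ((((colLinesOf matrix m)[j.toNat]'hcll).take matrix.length)[i.toNat]'hple2)
          = PySem.List.pyGetD (PySem.List.pyGetD matrix i []) j 0 := by
        rw [List.getElem_of_eq e1, List.getElem_map]
        conv_rhs => rw [← hrowi]
      rw [hv2, hc]
      omega
    have hcol := c4 j.toNat hcll i.toNat hple2 hvne2
    have hkeyc : ((((i.toNat : Nat) : Int), (0 : Int) + (j.toNat : Int)) : Int × Int) = (i, j) := by
      simp [Int.toNat_of_nonneg hi.1, Int.toNat_of_nonneg hj.1]
    rw [hkeyc] at hcol
    rw [hrow, hcol]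
    congr 2
    · rw [hrowi]
    · rw [e1]
  · rw [if_neg (by simpa using hc), if_neg (by simpa using hc)]

def gridB (matrix : List (List Int)) (m : Int) : List (List Int) :=
  matrix.map (fun row => PySem.List.slice row none (some m))

def colsBOf (grid : List (List Int)) (m : Int) : List (List Int) :=
  (PySem.List.pyRange 0 m 1).map (fun j => grid.map (fun row => PySem.List.pyGetD row j 0))

lemma solve_alt_eq (matrix : List (List Int)) :
    solve_alt matrix =
      (PySem.List.enumerate (gridB matrix ((PySem.List.pyGetD matrix 0 []).length : Int)) 0).foldl
        (fun ans p =>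
          (PySem.List.enumerate p.2 0).foldl
            (fun ans q =>
              if q.2 == 0 then
                max ans
                  (PySem.List.pyGetD
                      (PySem.List.pyGetD
                        ((gridB matrix ((PySem.List.pyGetD matrix 0 []).length : Int)).map segTotals) p.1 []) q.1 0 +
                   PySem.List.pyGetD
                      (PySem.List.pyGetD
                        ((colsBOf (gridB matrix ((PySem.List.pyGetD matrix 0 []).length : Int))
                            ((PySem.List.pyGetD matrix 0 []).length : Int)).map segTotals) q.1 []) p.1 0)
              else ans)
            ans)
        0 := rfl

lemma B_to_canon (matrix : List (List Int))
    (hm : ∀ row ∈ matrix, ((PySem.List.pyGetD matrix 0 []).length : Int) ≤ (row.length : Int)) :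
    solve_alt matrix
      = canonVal matrix (matrix.length : Int) ((PySem.List.pyGetD matrix 0 []).length : Int) := by
  set m : Int := ((PySem.List.pyGetD matrix 0 []).length : Int) with hmdef
  have h0m : 0 ≤ m := by positivity
  have hgrid : gridB matrix m = matrix.map (fun row => row.take m.toNat) := by
    rw [gridB]
    apply List.map_congr_left
    intro row _
    exact PySem.List.slice_to row h0m
  rw [solve_alt_eq, hgrid, canonVal,
    PySem.List.enumerate_eq_map_pyRange (matrix.map (fun row => row.take m.toNat)) ([] : List Int),
    List.foldl_map, PySem.List.len_eq, List.length_map]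
  apply PySem.List.foldl_congr_mem
  intro ans i hi
  rw [PySem.List.mem_pyRange_one] at hi
  have htknil : ([] : List Int).take m.toNat = [] := List.take_nil
  have hgi : PySem.List.pyGetD (matrix.map (fun row => row.take m.toNat)) i []
      = (PySem.List.pyGetD matrix i []).take m.toNat := by
    have h := PySem.List.pyGetD_map (fun row : List Int => row.take m.toNat) matrix i []
    rw [htknil] at h
    exact h
  have hilt : i.toNat < matrix.length := by omega
  have hrowi : matrix[i.toNat]'hilt = PySem.List.pyGetD matrix i [] :=
    (PySem.List.pyGetD_eq_getElem matrix [] hi.1 (by exact_mod_cast hi.2)).symm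
  have hmrow : m ≤ ((PySem.List.pyGetD matrix i []).length : Int) :=
    hm _ (by rw [← hrowi]; exact List.getElem_mem _)
  have hleni : ((((PySem.List.pyGetD matrix i []).take m.toNat).length : Nat) : Int) = m := by
    simp [List.length_take]
    omega
  rw [hgi, PySem.List.enumerate_eq_map_pyRange ((PySem.List.pyGetD matrix i []).take m.toNat) (0 : Int),
    List.foldl_map, PySem.List.len_eq, hleni]
  apply PySem.List.foldl_congr_mem
  intro a2 j hj
  rw [PySem.List.mem_pyRange_one] at hj
  have htk : PySem.List.pyGetD ((PySem.List.pyGetD matrix i []).take m.toNat) j 0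
      = PySem.List.pyGetD (PySem.List.pyGetD matrix i []) j 0 :=
    pyGetD_take_eq hj.1 (by omega)
  rw [htk]
  by_cases hc : PySem.List.pyGetD (PySem.List.pyGetD matrix i []) j 0 = 0
  · rw [if_pos (by simpa using hc), if_pos (by simpa using hc)]
    congr 1
    have hjrow : j < ((PySem.List.pyGetD matrix i []).length : Int) := by omega
    -- row summand
    have hrt : PySem.List.pyGetD ((matrix.map (fun row => row.take m.toNat)).map segTotals) i []
        = segTotals ((PySem.List.pyGetD matrix i []).take m.toNat) := by
      rw [List.map_map]
      have h := PySem.List.pyGetD_map (fun row : List Int => segTotals (row.take m.toNat)) matrix i []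
      have hd : segTotals (([] : List Int).take m.toNat) = [] := by
        rw [htknil]
        rfl
      rw [hd] at h
      exact h
    obtain ⟨hlenS, hgetS⟩ := segTotals_spec ((PySem.List.pyGetD matrix i []).take m.toNat).length
      ((PySem.List.pyGetD matrix i []).take m.toNat) (le_refl _)
    have hjlt : j.toNat < ((PySem.List.pyGetD matrix i []).take m.toNat).length := by
      simp [List.length_take]
      omega
    have hvtk : (((PySem.List.pyGetD matrix i []).take m.toNat)[j.toNat]'hjlt) ≠ 1 := by
      rw [List.getElem_take, ← PySem.List.pyGetD_eq_getElem _ 0 hj.1 (by exact_mod_cast hjrow), hc]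
      omega
    have h1 : PySem.List.pyGetD (segTotals ((PySem.List.pyGetD matrix i []).take m.toNat)) j 0
        = segCount ((PySem.List.pyGetD matrix i []).take m.toNat) j.toNat := by
      rw [PySem.List.pyGetD_of_nonneg _ _ hj.1]
      exact hgetS j.toNat hjlt hvtk
    -- column summand
    have hct : PySem.List.pyGetD ((colsBOf (matrix.map (fun row => row.take m.toNat)) m).map segTotals) j []
        = segTotals ((matrix.map (fun row => row.take m.toNat)).map (fun row => PySem.List.pyGetD row j 0)) := by
      rw [colsBOf, List.map_map]
      have hm' : m = ((m.toNat : Nat) : Int) := (Int.toNat_of_nonneg h0m).symm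
      have hj' : j = ((j.toNat : Nat) : Int) := (Int.toNat_of_nonneg hj.1).symm
      rw [hj', hm']
      exact PySem.List.pyGetD_map_pyRange _ m.toNat j.toNat [] (by omega)
    have hcoleq : (matrix.map (fun row => row.take m.toNat)).map (fun row => PySem.List.pyGetD row j 0)
        = matrix.map (fun r => PySem.List.pyGetD r j 0) := by
      rw [List.map_map]
      apply List.map_congr_left
      intro r _
      exact pyGetD_take_eq hj.1 (by omega)
    obtain ⟨hlenC, hgetC⟩ := segTotals_spec (matrix.map (fun r => PySem.List.pyGetD r j 0)).length
      (matrix.map (fun r => PySem.List.pyGetD r j 0)) (le_refl _)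
    have hiltC : i.toNat < (matrix.map (fun r => PySem.List.pyGetD r j 0)).length := by
      simp
      omega
    have hvC : ((matrix.map (fun r => PySem.List.pyGetD r j 0))[i.toNat]'hiltC) ≠ 1 := by
      rw [List.getElem_map, hrowi, hc]
      omega
    have h2 : PySem.List.pyGetD (segTotals (matrix.map (fun r => PySem.List.pyGetD r j 0))) i 0
        = segCount (matrix.map (fun r => PySem.List.pyGetD r j 0)) i.toNat := by
      rw [PySem.List.pyGetD_of_nonneg _ _ hi.1]
      exact hgetC i.toNat hiltC hvC
    rw [hrt, h1, hct, hcoleq, h2]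
  · rw [if_neg (by simpa using hc), if_neg (by simpa using hc)]

lemma headI_eq_pyGetD (matrix : List (List Int)) :
    matrix.headI = PySem.List.pyGetD matrix 0 [] := by
  cases matrix with
  | nil =>
    simp [PySem.List.pyGetD, PySem.List.pyGet?, PySem.List.pyIdx?]
    rfl
  | cons a t => simp [PySem.List.pyGetD, PySem.List.pyGet?, PySem.List.pyIdx?]

-- ===== VERDICT (by name: the statement is the Claim_ definition above) =====
theorem solve_spec : Claim_equal_solve := by
  intro matrix _ hpre
  unfold Spec_solve
  obtain ⟨hne, hrows⟩ := hpre
  have hm : ∀ row ∈ matrix, ((PySem.List.pyGetD matrix 0 []).length : Int) ≤ (row.length : Int) := by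
    intro row hr
    rw [← headI_eq_pyGetD]
    exact_mod_cast hrows row hr
  rw [A_to_canon matrix hm, B_to_canon matrix hm]
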